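-- pv_equiv track=rewrite | github.com/sachin-duhan/COMPETITVE-PROGRAMMING | main.py | solve
-- ===== SOURCE A (Python) =====
-- def solve(s):
--     toDelete = s[0]
--     others = ""
--     for c in s:
--         if c != toDelete:
--             others += c
--     s = others
--
--     # prefix of length 1 surely doesn't contain different letters
--     prefix = s[0]
--     for i in range(1, len(s)):
--         # each letter should be the same as the first
--         if s[i] == prefix[0]:
--             prefix += s[i]
--         else:
--             break
--     return prefix
-- ===== SOURCE B (Python) =====
-- def solve(s):
--     d = s[0]
--     n = len(s)
--     i = 0
--     while i < n and s[i] == d: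
--         i += 1
--     r = s[i]  # IndexError here, naturally, when every char equals s[0]
--     run = r
--     for c in s[i+1:]:
--         if c == d:
--             continue
--         if c == r:
--             run += c
--         else:
--             break
--     return run
-- ===== Notes on version B (the rewrite author's own statement) =====
-- stated objective: faster
-- what changed: Single pass with no intermediate filtered string: skip the leading run of s[0], take the next char r, then scan once skipping s[0]-chars and collecting r-chars until another char appears, instead of first building the whole filtered copy via repeated string concatenation and then re-scanning its prefix.
import Mathlib
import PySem

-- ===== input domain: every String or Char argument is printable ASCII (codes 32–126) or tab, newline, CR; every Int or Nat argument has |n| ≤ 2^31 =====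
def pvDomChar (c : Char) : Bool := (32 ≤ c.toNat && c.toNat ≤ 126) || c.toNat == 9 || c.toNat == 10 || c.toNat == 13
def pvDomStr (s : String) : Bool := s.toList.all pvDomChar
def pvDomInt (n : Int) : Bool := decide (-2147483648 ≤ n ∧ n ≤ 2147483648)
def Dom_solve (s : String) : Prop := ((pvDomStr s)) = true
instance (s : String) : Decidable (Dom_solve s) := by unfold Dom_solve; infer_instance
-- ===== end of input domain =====

-- B replaces A's two passes (build a filtered copy by repeated concatenation, then
-- re-scan its prefix) with one skip-then-collect pass over the original string.

-- ===== PORT A =====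
-- the prefix loop: 'for i in range(1,len(s)): if s[i]==prefix[0]: prefix += s[i] else: break'
def solvePrefixLoop (first : Char) (rest : List Char) (pre : List Char) : List Char :=
  match rest with
  | [] => pre
  | c :: cs => if c == first then solvePrefixLoop first cs (pre ++ [c]) else pre

def solve (s : String) : String :=
  match PySem.Str.pyGet? s 0 with
  | none => ""                    -- IndexError on empty s (excluded by Pre_solve)
  | some toDelete =>
    let others := s.toList.foldl (fun acc c => if c ≠ toDelete then acc ++ [c] else acc) []
    match others with
    | [] => ""                    -- IndexError: others[0] on empty filtered string (excluded by Pre_solve)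
    | p :: rest => String.ofList (solvePrefixLoop p rest [p])

-- ===== PORT B =====
-- 'while i < n and s[i] == d: i += 1' : drop the leading run of d
def solveAltSkip (d : Char) (l : List Char) : List Char :=
  match l with
  | [] => []
  | c :: cs => if c == d then solveAltSkip d cs else c :: cs

-- 'for c in s[i+1:]: if c == d: continue; if c == r: run += c; else: break'
def solveAltRun (d r : Char) (l : List Char) (run : List Char) : List Char :=
  match l with
  | [] => run
  | c :: cs =>
    if c == d then solveAltRun d r cs run
    else if c == r then solveAltRun d r cs (run ++ [c])
    else run

def solve_alt (s : String) : String :=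
  match PySem.Str.pyGet? s 0 with
  | none => ""                    -- IndexError on empty s (excluded by Pre_solve)
  | some d =>
    match solveAltSkip d s.toList with
    | [] => ""                    -- IndexError: s[i] with i = n (excluded by Pre_solve)
    | r :: rest => String.ofList (solveAltRun d r rest [r])

-- ===== PRECONDITION & SPEC =====
-- Pre_ excludes exactly the inputs where the Python A raises IndexError: the empty
-- string, and strings whose characters are all equal to s[0] (the filtered string is
-- empty). B raises IndexError there as well.
def Pre_solve (s : String) : Prop :=
  (s.toList.any (fun c => decide (c ≠ s.toList.headD 'a'))) = true
instance (s : String) : Decidable (Pre_solve s) := by unfold Pre_solve; infer_instance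
def pvWitness_solve : String := "aab"
def Spec_solve (s : String) (out : String) : Prop := out = solve_alt s
instance (s : String) (out : String) : Decidable (Spec_solve s out) := by unfold Spec_solve; infer_instance

-- ===== CLAIM (what is proved, stated in full; the proofs are below) =====
def Claim_equal_solve : Prop := ∀ (s : String), Dom_solve s → Pre_solve s → Spec_solve s (solve s)

-- ===== LEMMAS AND PROOFS =====

-- skipping the leading d-run preserves the d-free sublist
theorem filter_skip (d : Char) (l : List Char) :
    (solveAltSkip d l).filter (fun c => decide (c ≠ d)) = l.filter (fun c => decide (c ≠ d)) := by
  induction l with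
  | nil => rfl
  | cons c cs ih =>
    simp only [solveAltSkip]
    by_cases h : c = d
    · subst h; simpa using ih
    · simp [h]

-- head of the skip result differs from d
theorem skip_head_ne (d : Char) (l : List Char) (r : Char) (rest : List Char)
    (h : solveAltSkip d l = r :: rest) : r ≠ d := by
  induction l with
  | nil => simp [solveAltSkip] at h
  | cons c cs ih =>
    simp only [solveAltSkip] at h
    by_cases hc : c = d
    · simp [hc] at h; exact ih h
    · simp [hc] at h
      exact fun he => hc (h.1.trans he)

-- A's prefix loop on the filtered tail = B's run loop on the raw tail
theorem prefixLoop_eq_run (d r : Char) (hr : r ≠ d) (l : List Char) (acc : List Char) :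
    solvePrefixLoop r (l.filter (fun c => decide (c ≠ d))) acc = solveAltRun d r l acc := by
  induction l generalizing acc with
  | nil => rfl
  | cons c cs ih =>
    by_cases hd : c = d
    · subst hd
      have h1 : solveAltRun c r (c :: cs) acc = solveAltRun c r cs acc := by
        simp [solveAltRun]
      have h2 : (c :: cs).filter (fun x => decide (x ≠ c)) = cs.filter (fun x => decide (x ≠ c)) := by
        simp
      rw [h2, h1, ih]
    · have h2 : (c :: cs).filter (fun x => decide (x ≠ d)) = c :: cs.filter (fun x => decide (x ≠ d)) := by
        simp [hd]
      rw [h2]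
      by_cases hcr : c = r
      · subst hcr
        have h3 : solveAltRun d c (c :: cs) acc = solveAltRun d c cs (acc ++ [c]) := by
          simp [solveAltRun, hd]
        have h4 : solvePrefixLoop c (c :: cs.filter (fun x => decide (x ≠ d))) acc
            = solvePrefixLoop c (cs.filter (fun x => decide (x ≠ d))) (acc ++ [c]) := by
          simp [solvePrefixLoop]
        rw [h3, h4, ih]
      · have h3 : solveAltRun d r (c :: cs) acc = acc := by
          simp [solveAltRun, hd, hcr]
        have h4 : solvePrefixLoop r (c :: cs.filter (fun x => decide (x ≠ d))) acc = acc := by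
          simp [solvePrefixLoop, hcr]
        rw [h3, h4]

theorem solve_eq_alt (s : String) (hp : Pre_solve s) : solve s = solve_alt s := by
  unfold solve solve_alt
  unfold Pre_solve at hp
  cases hl : s.toList with
  | nil => rw [hl] at hp; simp at hp
  | cons c0 cs =>
    have hget : PySem.Str.pyGet? s 0 = some c0 := by
      simp [PySem.Str.pyGet?, PySem.List.pyGet?, PySem.List.pyIdx?, hl]
    rw [hget]
    simp only []
    have hfold : (c0 :: cs).foldl (fun acc c => if c ≠ c0 then acc ++ [c] else acc) ([] : List Char)
        = (c0 :: cs).filter (fun c => decide (c ≠ c0)) := by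
      rw [PySem.List.foldl_append_ite_eq_filter]; simp
    rw [hfold, ← filter_skip c0 (c0 :: cs)]
    cases hsk : solveAltSkip c0 (c0 :: cs) with
    | nil =>
      exfalso
      have hfil : (c0 :: cs).filter (fun c => decide (c ≠ c0)) = [] := by
        rw [← filter_skip c0 (c0 :: cs), hsk]; rfl
      rw [hl] at hp
      simp only [List.headD, List.any_eq_true] at hp
      obtain ⟨x, hx, hxne⟩ := hp
      rw [List.filter_eq_nil_iff] at hfil
      exact absurd (hfil x hx) (by simpa using hxne)
    | cons r rest =>
      have hrd : r ≠ c0 := skip_head_ne c0 (c0 :: cs) r rest hsk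
      have hfr : (r :: rest).filter (fun c => decide (c ≠ c0)) =
          r :: rest.filter (fun c => decide (c ≠ c0)) := by simp [hrd]
      rw [hfr]
      simp only
      rw [prefixLoop_eq_run c0 r hrd rest [r]]

-- ===== VERDICT (by name: the statement is the Claim_ definition above) =====
theorem solve_spec : Claim_equal_solve := by
  intro s _ hp
  unfold Spec_solve
  exact solve_eq_alt s hp
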